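-- pv_equiv track=rewrite | github.com/arosen64/ClassPicker | functions.py | all_variations
-- ===== SOURCE A (Python) =====
-- def all_variations(lst, index):
--     if index < 0:
--         return [[]]
--
--     result = []
--     for variation in all_variations(lst, index - 1):
--         for item in lst[index]:
--             result.append(variation + [item])
--
--     return result
-- ===== SOURCE B (Python) =====
-- def all_variations(lst, index):
--     def product(ls):
--         if not ls:
--             return [[]]
--         rests = product(ls[1:])
--         return [[item] + rest for item in ls[0] for rest in rests]
--     return product(lst[:index + 1] if index >= 0 else [])
-- ===== Notes on version B (the rewrite author's own statement) =====
-- stated objective: alternative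
-- what changed: Replaces A's recursion on the integer index (building each variation by appending on the right) with head-recursion over the list structure of the prefix lst[:index+1]: product([]) = [[]] and product(h::t) prepends each item of h to every variation of the tail.
import Mathlib
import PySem

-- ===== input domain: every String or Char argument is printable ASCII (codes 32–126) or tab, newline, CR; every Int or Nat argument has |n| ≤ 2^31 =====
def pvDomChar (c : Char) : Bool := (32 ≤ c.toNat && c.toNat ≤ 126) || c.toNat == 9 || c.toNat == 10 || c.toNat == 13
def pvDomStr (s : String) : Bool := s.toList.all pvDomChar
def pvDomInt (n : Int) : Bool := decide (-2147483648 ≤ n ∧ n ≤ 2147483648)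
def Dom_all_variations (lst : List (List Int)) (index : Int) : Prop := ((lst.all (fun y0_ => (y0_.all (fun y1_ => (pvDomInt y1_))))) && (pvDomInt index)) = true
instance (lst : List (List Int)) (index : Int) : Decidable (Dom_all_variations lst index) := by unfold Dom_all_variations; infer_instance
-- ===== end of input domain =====

-- B replaces A's recursion on the integer index (appending each item on the right of a variation)
-- by head-recursion over the list structure of the prefix lst[:index+1]; equivalence is proved on
-- Pre_ (index < len(lst) or [] ∈ lst), exactly where Python A returns without IndexError.

-- ===== PORT A =====
-- literal port of A's recursion; lst[index] via pyGetD (exact inside Pre_, where the access either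
-- is in range or is never evaluated because the variation loop is empty)
def all_variations (lst : List (List Int)) (index : Int) : List (List Int) :=
  if index < 0 then [[]]
  else
    (all_variations lst (index - 1)).foldl
      (fun result variation =>
        (PySem.List.pyGetD lst index []).foldl
          (fun result item => result ++ [variation ++ [item]]) result)
      []
termination_by (index + 1).toNat
decreasing_by omega

-- ===== PORT B =====
-- literal port of Source B's inner 'product': head recursion on the list, comprehension as flatMap/map
def pvProduct : List (List Int) → List (List Int)
  | [] => [[]]
  | h :: t =>
    let rests := pvProduct t
    h.flatMap (fun item => rests.map (fun rest => item :: rest))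

def all_variations_alt (lst : List (List Int)) (index : Int) : List (List Int) :=
  pvProduct (if 0 ≤ index then PySem.List.slice lst none (some (index + 1)) else [])

-- ===== PRECONDITION & SPEC =====
-- Pre_: exactly where Python A returns; if index ≥ len(lst) and no list in lst is empty, the
-- accumulated variations are nonempty when the recursion reaches len(lst), so lst[index] raises IndexError
def Pre_all_variations (lst : List (List Int)) (index : Int) : Prop := index < (lst.length : Int) ∨ [] ∈ lst
instance (lst : List (List Int)) (index : Int) : Decidable (Pre_all_variations lst index) := by unfold Pre_all_variations; infer_instance
def pvWitness_all_variations : List (List Int) × Int := ([[1, 2], [3]], 1)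

def Spec_all_variations (lst : List (List Int)) (index : Int) (out : List (List Int)) : Prop := out = all_variations_alt lst index
instance (lst : List (List Int)) (index : Int) (out : List (List Int)) : Decidable (Spec_all_variations lst index out) := by unfold Spec_all_variations; infer_instance

-- ===== CLAIM (what is proved, stated in full; the proofs are below) =====
def Claim_equal_all_variations : Prop := ∀ (lst : List (List Int)) (index : Int), Dom_all_variations lst index → Pre_all_variations lst index → Spec_all_variations lst index (all_variations lst index)

-- ===== LEMMAS AND PROOFS =====

-- A's nested append-foldl is a flatMap of maps
theorem all_variations_flatMap (lst : List (List Int)) (index : Int) (h : ¬ index < 0) :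
    all_variations lst index =
      (all_variations lst (index - 1)).flatMap
        (fun v => (PySem.List.pyGetD lst index []).map (fun i => v ++ [i])) := by
  rw [all_variations, if_neg h]
  simp only [PySem.List.foldl_append_singleton_eq_map,
    PySem.List.foldl_append_eq_flatMap, List.nil_append]

-- snoc characterisation of the head-recursive product
theorem pvProduct_append_singleton (l : List (List Int)) (x : List Int) :
    pvProduct (l ++ [x]) = (pvProduct l).flatMap (fun v => x.map (fun i => v ++ [i])) := by
  induction l with
  | nil =>
      simp [pvProduct]
      induction x with
      | nil => rfl
      | cons a t ih => simp [ih]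
  | cons h t ih =>
      simp only [List.cons_append, pvProduct, ih]
      simp [List.flatMap_assoc, List.flatMap_map, List.map_flatMap, Function.comp_def]

theorem pvProduct_eq_nil_of_mem (l : List (List Int)) (h : [] ∈ l) : pvProduct l = [] := by
  induction l with
  | nil => simp at h
  | cons a t ih =>
      rcases List.mem_cons.mp h with h1 | h2
      · simp [pvProduct, ← h1]
      · simp [pvProduct, ih h2]

-- inside the list, A computes the product of the prefix
theorem all_variations_eq_product (lst : List (List Int)) (index : Int)
    (h0 : ¬ index < 0) (hlt : index < (lst.length : Int)) :
    all_variations lst index = pvProduct (lst.take (index + 1).toNat) := by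
  rw [all_variations_flatMap lst index h0]
  have hnat : (index + 1).toNat = index.toNat + 1 := by omega
  have hidx : index.toNat < lst.length := by omega
  have htake : lst.take (index + 1).toNat = lst.take index.toNat ++ [lst[index.toNat]] := by
    rw [hnat, List.take_add_one, List.getElem?_eq_getElem hidx]; rfl
  rw [htake, pvProduct_append_singleton]
  have hget0 : PySem.List.pyGetD lst index [] = lst.getD index.toNat [] := by
    rw [show index = ((index.toNat : Nat) : Int) from by omega]
    exact PySem.List.pyGetD_natCast lst index.toNat []
  rw [hget0, List.getD_eq_getElem _ _ hidx]
  by_cases hz : index - 1 < 0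
  · rw [all_variations, if_pos hz]
    have : index.toNat = 0 := by omega
    simp [this, pvProduct]
  · rw [all_variations_eq_product lst (index - 1) hz (by omega)]
    have : (index - 1 + 1).toNat = index.toNat := by omega
    rw [this]
termination_by (index + 1).toNat
decreasing_by omega

-- when an empty list occurs in the prefix, A returns []
theorem all_variations_eq_nil (lst : List (List Int)) (index : Int)
    (h0 : ¬ index < 0) (hmem : [] ∈ lst.take (index + 1).toNat) :
    all_variations lst index = [] := by
  rw [all_variations_flatMap lst index h0]
  by_cases hcase : [] ∈ lst.take index.toNat
  · by_cases hz : index - 1 < 0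
    · exfalso
      have : index.toNat = 0 := by omega
      simp [this] at hcase
    · rw [all_variations_eq_nil lst (index - 1) hz (by
        have : (index - 1 + 1).toNat = index.toNat := by omega
        rw [this]; exact hcase)]
      rfl
  · -- the empty list must be at position index itself, so the inner map is empty
    have hget : PySem.List.pyGetD lst index [] = [] := by
      by_cases hidx : index.toNat < lst.length
      · have hnat : (index + 1).toNat = index.toNat + 1 := by omega
        rw [hnat, List.take_add_one, List.getElem?_eq_getElem hidx] at hmem
        rcases List.mem_append.mp hmem with h1 | h2
        · exact absurd h1 hcase
        · have heq : lst[index.toNat] = ([] : List Int) := by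
            have h3 : ([] : List Int) = lst[index.toNat] := by simpa using h2
            exact h3.symm
          have hget0 : PySem.List.pyGetD lst index [] = lst.getD index.toNat [] := by
            rw [show index = ((index.toNat : Nat) : Int) from by omega]
            exact PySem.List.pyGetD_natCast lst index.toNat []
          rw [hget0, List.getD_eq_getElem _ _ hidx, heq]
      · rw [show index = ((index.toNat : Nat) : Int) from by omega,
          PySem.List.pyGetD_natCast, List.getD_eq_default]
        omega
    simp [hget]
termination_by (index + 1).toNat
decreasing_by omega

-- ===== VERDICT (by name: the statement is the Claim_ definition above) =====
theorem all_variations_spec : Claim_equal_all_variations := by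
  intro lst index _ hpre
  unfold Spec_all_variations all_variations_alt
  by_cases h0 : index < 0
  · rw [all_variations, if_pos h0, if_neg (by omega)]
    rfl
  · rw [if_pos (by omega), PySem.List.slice_to lst (by omega)]
    rcases hpre with hlt | hmem
    · exact all_variations_eq_product lst index h0 hlt
    · by_cases hlt : index < (lst.length : Int)
      · exact all_variations_eq_product lst index h0 hlt
      · have htake : lst.take (index + 1).toNat = lst := List.take_of_length_le (by omega)
        rw [htake, pvProduct_eq_nil_of_mem lst hmem]
        exact all_variations_eq_nil lst index h0 (by rw [htake]; exact hmem)
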